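-- pv_equiv track=rewrite | github.com/ohad1s/Intro_to_Python | Summer/TA4/f7.py | moveCharToLast
-- ===== SOURCE A (Python) =====
-- def moveCharToLast(string,char):
--     new_str=""
--     counter=0
--     for c in string:
--         if c==char:
--             counter+=1
--         else:
--             new_str+=c
--     return new_str+(counter*char)
-- ===== SOURCE B (Python) =====
-- def moveCharToLast(string, char):
--     # stable sort: non-matching characters keep their order up front,
--     # matching characters (each equal to char) go to the end
--     return ''.join(sorted(string, key=lambda c: c == char))
-- ===== Notes on version B (the rewrite author's own statement) =====
-- stated objective: idiomatic
-- what changed: Replaces the manual accumulate-and-count loop with a one-line stable sort keyed on whether each character equals char, which partitions non-matching characters (in order) before the matching ones.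
import Mathlib
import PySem

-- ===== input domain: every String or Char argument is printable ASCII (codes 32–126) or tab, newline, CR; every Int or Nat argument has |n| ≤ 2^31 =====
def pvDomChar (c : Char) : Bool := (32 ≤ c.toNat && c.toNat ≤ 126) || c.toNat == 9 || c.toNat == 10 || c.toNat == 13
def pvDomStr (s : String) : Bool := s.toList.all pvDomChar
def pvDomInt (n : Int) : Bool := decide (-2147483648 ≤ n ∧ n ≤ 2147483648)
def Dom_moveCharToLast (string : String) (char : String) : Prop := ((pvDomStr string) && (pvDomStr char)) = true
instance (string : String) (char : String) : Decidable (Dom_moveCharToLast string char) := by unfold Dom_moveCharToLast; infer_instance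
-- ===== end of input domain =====

-- B replaces A's accumulate-and-count loop by a one-line stable sort keyed on (c == char); same result, idiomatic one-liner.

-- ===== PORT A =====
-- A: one pass; non-matching chars appended to new_str, matches counted; result = new_str + counter*char
def moveCharToLast (string : String) (char : String) : String :=
  let r := string.toList.foldl
    (fun (acc : List Char × Nat) c =>
      if String.ofList [c] == char then (acc.1, acc.2 + 1) else (acc.1 ++ [c], acc.2))
    ([], 0)
  String.ofList (r.1 ++ (List.replicate r.2 char.toList).flatten)

-- ===== PORT B =====
-- B: ''.join(sorted(string, key=lambda c: c == char)) — stable sort on the Bool key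
def moveCharToLast_alt (string : String) (char : String) : String :=
  String.ofList (PySem.List.sorted string.toList (fun c => String.ofList [c] == char) false)

-- ===== PRECONDITION & SPEC =====
def Spec_moveCharToLast (string : String) (char : String) (out : String) : Prop := out = moveCharToLast_alt string char
instance (string : String) (char : String) (out : String) : Decidable (Spec_moveCharToLast string char out) := by unfold Spec_moveCharToLast; infer_instance

-- ===== CLAIM (what is proved, stated in full; the proofs are below) =====
def Claim_equal_moveCharToLast : Prop := ∀ (string : String) (char : String), Dom_moveCharToLast string char → Spec_moveCharToLast string char (moveCharToLast string char)

-- ===== LEMMAS AND PROOFS =====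

theorem pv_insertBy_nil (f : Char → Char → Bool) (x : Char) :
    PySem.List.insertBy f x [] = [x] := rfl

theorem pv_insertBy_cons (f : Char → Char → Bool) (x y : Char) (ys : List Char) :
    PySem.List.insertBy f x (y :: ys) =
      if f x y then x :: y :: ys else y :: PySem.List.insertBy f x ys := rfl

-- inserting x into an accumulator of the form (all-false keys) ++ (all-true keys)
theorem pv_insertBy_partition (key : Char → Bool) (x : Char) (F T : List Char)
    (hF : ∀ a ∈ F, key a = false) (hT : ∀ a ∈ T, key a = true) :
    PySem.List.insertBy (fun a b => decide (key a < key b)) x (F ++ T) =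
      if key x then F ++ T ++ [x] else F ++ [x] ++ T := by
  induction F with
  | nil =>
    simp only [List.nil_append]
    induction T with
    | nil => cases hx : key x <;> simp [pv_insertBy_nil]
    | cons y ys ih =>
      have hy : key y = true := hT y (by simp)
      have hys : ∀ a ∈ ys, key a = true := fun a ha => hT a (by simp [ha])
      rw [pv_insertBy_cons]
      cases hx : key x with
      | false => simp [hy, Bool.lt_iff]
      | true =>
        have h2 : (decide (key x < key y)) = false := by simp [hx, hy]
        rw [if_neg (by simp [h2]), ih hys, if_pos hx]
        simp
  | cons a F' ih =>
    have ha : key a = false := hF a (by simp)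
    have hF' : ∀ b ∈ F', key b = false := fun b hb => hF b (by simp [hb])
    have h2 : (decide (key x < key a)) = false := by simp [ha, Bool.lt_iff]
    rw [List.cons_append, pv_insertBy_cons, if_neg (by simp [h2]), ih hF']
    cases key x <;> simp

-- the insertion-sort fold splits the input into false-key part ++ true-key part
theorem pv_foldl_insert_partition (key : Char → Bool) (l : List Char) (F T : List Char)
    (hF : ∀ a ∈ F, key a = false) (hT : ∀ a ∈ T, key a = true) :
    l.foldl (fun acc x => PySem.List.insertBy (fun a b => decide (key a < key b)) x acc) (F ++ T) =
      (F ++ l.filter (fun c => !key c)) ++ (T ++ l.filter key) := by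
  induction l generalizing F T with
  | nil => simp
  | cons x xs ih =>
    simp only [List.foldl_cons]
    rw [pv_insertBy_partition key x F T hF hT]
    cases hx : key x with
    | false =>
      have hF2 : ∀ a ∈ F ++ [x], key a = false := by
        intro a ha
        rcases List.mem_append.mp ha with h | h
        · exact hF a h
        · simp at h; simpa [h] using hx
      have h1 : F ++ [x] ++ T = (F ++ [x]) ++ T := by simp
      rw [if_neg (by simp [hx]), h1, ih (F ++ [x]) T hF2 hT]
      simp [List.filter_cons, hx]
    | true =>
      have hT2 : ∀ a ∈ T ++ [x], key a = true := by
        intro a ha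
        rcases List.mem_append.mp ha with h | h
        · exact hT a h
        · simp at h; simpa [h] using hx
      have h1 : F ++ T ++ [x] = F ++ (T ++ [x]) := by simp
      rw [if_pos rfl, h1, ih F (T ++ [x]) hF hT2]
      simp [List.filter_cons, hx]

-- B's sort = partition
theorem pv_sorted_partition (key : Char → Bool) (l : List Char) :
    PySem.List.sorted l key false = l.filter (fun c => !key c) ++ l.filter key := by
  have := pv_foldl_insert_partition key l [] [] (by simp) (by simp)
  simpa [PySem.List.sorted] using this

-- A's fold = (filtered non-matches, count of matches)
theorem pv_foldA (char : String) (l : List Char) (F : List Char) (n : Nat) :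
    l.foldl (fun (acc : List Char × Nat) c =>
        if String.ofList [c] == char then (acc.1, acc.2 + 1) else (acc.1 ++ [c], acc.2)) (F, n) =
      (F ++ l.filter (fun c => !(String.ofList [c] == char)),
       n + (l.filter (fun c => String.ofList [c] == char)).length) := by
  induction l generalizing F n with
  | nil => simp
  | cons x xs ih =>
    simp only [List.foldl_cons]
    cases hx : (String.ofList [x] == char) with
    | false =>
      rw [if_neg (by simp [hx]), ih]
      simp [List.filter_cons, hx]
    | true =>
      rw [if_pos rfl, ih]
      simp [List.filter_cons, hx]
      omega

-- replicate char.toList over a list of chars all equal to char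
theorem pv_flatten_replicate (char : String) (L : List Char)
    (h : ∀ x ∈ L, char.toList = [x]) :
    (List.replicate L.length char.toList).flatten = L := by
  induction L with
  | nil => simp
  | cons c t ih =>
    have hc : char.toList = [c] := h c (by simp)
    rw [List.length_cons, List.replicate_succ, List.flatten_cons,
      ih (fun x hx => h x (by simp [hx])), hc]
    simp

-- ===== VERDICT (by name: the statement is the Claim_ definition above) =====
theorem moveCharToLast_spec : Claim_equal_moveCharToLast := by
  intro string char _
  unfold Spec_moveCharToLast moveCharToLast moveCharToLast_alt
  rw [pv_sorted_partition, pv_foldA]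
  simp only [List.nil_append, Nat.zero_add]
  congr 1
  congr 1
  apply pv_flatten_replicate
  intro x hx
  have h1 := List.of_mem_filter hx
  have hx' : String.ofList [x] = char := by simpa using h1
  have h2 : (String.ofList [x]).toList = [x] := String.toList_ofList
  rw [← h2]
  exact congrArg String.toList hx'.symm
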